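-- pv_equiv track=rewrite | github.com/TBSKBJustin/CMAS | controller/state_store.py | _compute_overall_status
-- ===== SOURCE A (Python) =====
-- from typing import Dict, Optional
--
-- def _compute_overall_status(results: Dict) -> str:
--     """
--     Compute overall workflow status from module results
--
--     Returns:
--         One of: "success", "partial", "failed"
--     """
--     if not results:
--         return "failed"
--
--     statuses = [r.get("status", "unknown") for r in results.values()]
--
--     if all(s == "success" for s in statuses):
--         return "success"
--     elif any(s == "success" for s in statuses):
--         return "partial"
--     else:
--         return "failed"
-- ===== SOURCE B (Python) =====
-- def _compute_overall_status(results) -> str: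
--     """Algebraic reduction: each module yields a local verdict, verdicts are
--     combined with an absorbing merge (equal -> itself, mixed -> "partial")."""
--     def verdict(r):
--         return "success" if r.get("status", "unknown") == "success" else "failed"
--
--     def merge(a, b):
--         return a if a == b else "partial"
--
--     it = iter(results.values())
--     try:
--         acc = verdict(next(it))
--     except StopIteration:
--         return "failed"
--     for r in it:
--         acc = merge(acc, verdict(r))
--     return acc
-- ===== Notes on version B (the rewrite author's own statement) =====
-- stated objective: alternative
-- what changed: Replaces the materialised statuses list and the two all()/any() scans with a semilattice reduction: each entry is mapped to a local verdict (success/failed) and the verdicts are folded with an absorbing merge operator (equal verdicts keep the verdict, mixed verdicts yield partial).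
import Mathlib
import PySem

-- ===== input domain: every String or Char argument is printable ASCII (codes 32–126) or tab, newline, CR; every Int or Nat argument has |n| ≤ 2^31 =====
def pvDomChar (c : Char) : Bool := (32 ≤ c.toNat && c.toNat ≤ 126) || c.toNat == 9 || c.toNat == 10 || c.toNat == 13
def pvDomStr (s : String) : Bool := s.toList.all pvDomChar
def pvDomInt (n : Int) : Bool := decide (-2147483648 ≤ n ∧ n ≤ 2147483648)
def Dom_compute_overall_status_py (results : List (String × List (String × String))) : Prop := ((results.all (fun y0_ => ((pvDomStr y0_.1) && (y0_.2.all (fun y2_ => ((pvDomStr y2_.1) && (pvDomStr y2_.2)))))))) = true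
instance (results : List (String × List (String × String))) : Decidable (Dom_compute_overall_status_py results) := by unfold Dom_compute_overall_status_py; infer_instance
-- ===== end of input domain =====

-- B replaces A's statuses list and all()/any() scans with a semilattice reduction of per-entry verdicts; alternative decomposition, same cost.

-- ===== PORT A =====
def compute_overall_status_py (results : List (String × List (String × String))) : String :=
  if results = [] then "failed"
  else
    let statuses := results.map (fun r => (PySem.Dict.mk r.2).getD "status" "unknown")
    if statuses.all (fun s => s == "success") then "success"
    else if statuses.any (fun s => s == "success") then "partial"
    else "failed"

-- ===== PORT B =====
-- per-entry verdict
def pvVerdict (r : String × List (String × String)) : String :=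
  if (PySem.Dict.mk r.2).getD "status" "unknown" == "success" then "success" else "failed"

-- absorbing merge: equal verdicts keep the verdict, mixed verdicts give "partial"
def pvMerge (a b : String) : String := if a = b then a else "partial"

def compute_overall_status_py_alt (results : List (String × List (String × String))) : String :=
  match results with
  | [] => "failed"
  | r :: rs => rs.foldl (fun acc x => pvMerge acc (pvVerdict x)) (pvVerdict r)

-- ===== PRECONDITION & SPEC =====
def Spec_compute_overall_status_py (results : List (String × List (String × String))) (out : String) : Prop := out = compute_overall_status_py_alt results
instance (results : List (String × List (String × String))) (out : String) : Decidable (Spec_compute_overall_status_py results out) := by unfold Spec_compute_overall_status_py; infer_instance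

-- ===== CLAIM (what is proved, stated in full; the proofs are below) =====
def Claim_equal_compute_overall_status_py : Prop := ∀ (results : List (String × List (String × String))), Dom_compute_overall_status_py results → Spec_compute_overall_status_py results (compute_overall_status_py results)

-- ===== LEMMAS AND PROOFS =====

-- "partial" is absorbing for the merge fold
theorem pv_fold_partial (rs : List (String × List (String × String))) :
    rs.foldl (fun acc x => pvMerge acc (pvVerdict x)) "partial" = "partial" := by
  induction rs with
  | nil => rfl
  | cons x xs ih =>
    rw [List.foldl_cons]
    have h : pvMerge "partial" (pvVerdict x) = "partial" := by
      unfold pvMerge; split_ifs <;> rfl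
  -- merge of "partial" with anything is "partial"
    rw [h, ih]

-- starting from a verdict acc, the fold returns acc if every verdict equals acc, else "partial"
theorem pv_fold_char (rs : List (String × List (String × String))) (acc : String)
    (hacc : acc = "success" ∨ acc = "failed") :
    rs.foldl (fun a x => pvMerge a (pvVerdict x)) acc
      = if rs.all (fun x => pvVerdict x == acc) then acc else "partial" := by
  induction rs generalizing acc with
  | nil => simp
  | cons x xs ih =>
    rw [List.foldl_cons, List.all_cons]
    by_cases h : pvVerdict x = acc
    · rw [show pvMerge acc (pvVerdict x) = acc from by simp [pvMerge, h], ih acc hacc, h]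
      simp only [beq_self_eq_true, Bool.true_and]
    · have hne : acc ≠ pvVerdict x := fun e => h e.symm
      rw [show pvMerge acc (pvVerdict x) = "partial" from by simp [pvMerge, hne]]
      rw [pv_fold_partial]
      simp [h]

-- every verdict is "success" or "failed"
theorem pv_verdict_cases (x : String × List (String × String)) :
    pvVerdict x = "success" ∨ pvVerdict x = "failed" := by
  unfold pvVerdict; split_ifs <;> simp

-- the verdict is "success" exactly when the looked-up status is "success"
theorem pv_verdict_iff (x : String × List (String × String)) :
    pvVerdict x = "success" ↔ (((PySem.Dict.mk x.2).getD "status" "unknown" == "success") = true) := by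
  unfold pvVerdict; split_ifs with h <;> simp [h]

-- unfolding both ports on a cons cell
theorem pv_a_cons (r : String × List (String × String)) (rs : List (String × List (String × String))) :
    compute_overall_status_py (r :: rs)
      = (if ((r :: rs).map (fun x => (PySem.Dict.mk x.2).getD "status" "unknown")).all
            (fun s => s == "success") then "success"
         else if ((r :: rs).map (fun x => (PySem.Dict.mk x.2).getD "status" "unknown")).any
            (fun s => s == "success") then "partial"
         else "failed") := by
  simp [compute_overall_status_py]

theorem pv_b_cons (r : String × List (String × String)) (rs : List (String × List (String × String))) :
    compute_overall_status_py_alt (r :: rs)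
      = rs.foldl (fun acc x => pvMerge acc (pvVerdict x)) (pvVerdict r) := rfl

-- ===== VERDICT (by name: the statement is the Claim_ definition above) =====
theorem compute_overall_status_py_spec : Claim_equal_compute_overall_status_py := by
  intro results _
  unfold Spec_compute_overall_status_py
  match results with
  | [] => rfl
  | r :: rs =>
    rw [pv_a_cons, pv_b_cons]
    by_cases hr : pvVerdict r = "success"
    · rw [pv_fold_char rs (pvVerdict r) (Or.inl hr), hr]
      by_cases hall : rs.all (fun x => pvVerdict x == "success") = true
      · have h1 : ((r :: rs).map (fun x => (PySem.Dict.mk x.2).getD "status" "unknown")).all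
            (fun s => s == "success") = true := by
          simp only [List.map_cons, List.all_cons, Bool.and_eq_true]
          refine ⟨by simpa using (pv_verdict_iff r).mp hr, ?_⟩
          simp only [List.all_eq_true] at hall ⊢
          intro s hs
          rcases List.mem_map.mp hs with ⟨x, hx, rfl⟩
          simpa using (pv_verdict_iff x).mp (by simpa using hall x hx)
        rw [if_pos h1, if_pos hall]
      · have h1 : ¬ ((r :: rs).map (fun x => (PySem.Dict.mk x.2).getD "status" "unknown")).all
            (fun s => s == "success") = true := by
          intro hab
          apply hall
          simp only [List.map_cons, List.all_cons, Bool.and_eq_true, List.all_eq_true] at hab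
          simp only [List.all_eq_true]
          intro x hx
          have := hab.2 _ (List.mem_map.mpr ⟨x, hx, rfl⟩)
          simp [(pv_verdict_iff x).mpr (by simpa using this)]
        have h2 : ((r :: rs).map (fun x => (PySem.Dict.mk x.2).getD "status" "unknown")).any
            (fun s => s == "success") = true := by
          simp only [List.map_cons, List.any_cons, Bool.or_eq_true]
          exact Or.inl (by simpa using (pv_verdict_iff r).mp hr)
        rw [if_neg h1, if_pos h2, if_neg hall]
    · have hr' : pvVerdict r = "failed" := (pv_verdict_cases r).resolve_left hr
      rw [pv_fold_char rs (pvVerdict r) (Or.inr hr'), hr']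
      have hrS : ¬ (((PySem.Dict.mk r.2).getD "status" "unknown" == "success") = true) :=
        fun h => hr ((pv_verdict_iff r).mpr h)
      have h1 : ¬ ((r :: rs).map (fun x => (PySem.Dict.mk x.2).getD "status" "unknown")).all
          (fun s => s == "success") = true := by
        simp only [List.map_cons, List.all_cons, Bool.and_eq_true]
        intro hab; exact hrS hab.1
      by_cases hallf : rs.all (fun x => pvVerdict x == "failed") = true
      · have h2 : ¬ ((r :: rs).map (fun x => (PySem.Dict.mk x.2).getD "status" "unknown")).any
            (fun s => s == "success") = true := by
          simp only [List.map_cons, List.any_cons, Bool.or_eq_true]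
          rintro (h | h)
          · exact hrS h
          · rcases List.any_eq_true.mp h with ⟨s, hs, hss⟩
            rcases List.mem_map.mp hs with ⟨x, hx, rfl⟩
            have hxf : pvVerdict x = "failed" := by
              simpa using (List.all_eq_true.mp hallf x hx)
            have hxs : pvVerdict x = "success" := (pv_verdict_iff x).mpr (by simpa using hss)
            rw [hxf] at hxs; exact absurd hxs (by decide)
        rw [if_neg h1, if_neg h2, if_pos hallf]
      · have h2 : ((r :: rs).map (fun x => (PySem.Dict.mk x.2).getD "status" "unknown")).any
            (fun s => s == "success") = true := by
          simp only [List.all_eq_true] at hallf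
          push Not at hallf
          rcases hallf with ⟨x, hx, hxne⟩
          have hxs : pvVerdict x = "success" :=
            (pv_verdict_cases x).resolve_right (by simpa using hxne)
          simp only [List.map_cons, List.any_cons, Bool.or_eq_true]
          exact Or.inr (List.any_eq_true.mpr
            ⟨_, List.mem_map.mpr ⟨x, hx, rfl⟩, by simpa using (pv_verdict_iff x).mp hxs⟩)
        rw [if_neg h1, if_pos h2, if_neg hallf]
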